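-- pv_equiv track=rewrite | github.com/NAIST-Archlab/qimax-soft | gqimax2/instructor.py | create_zip_chain
-- ===== SOURCE A (Python) =====
-- def create_zip_chain(num_operators, num_xoperators, is_cx_first):
--     total = num_operators + num_xoperators
--     result = [0] * total
--     step = 2
--     start = 0 if is_cx_first else 1
--     for i in range(start, min(total, num_xoperators * 2), step):
--         result[i] = 1
--     return result
-- ===== SOURCE B (Python) =====
-- def create_zip_chain(num_operators, num_xoperators, is_cx_first):
--     total = num_operators + num_xoperators
--     limit = max(0, min(total, num_xoperators * 2))
--     pad = max(0, total - limit)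
--     unit = [1, 0] if is_cx_first else [0, 1]
--     block = (unit * ((limit + 1) // 2))[:limit]
--     return block + [0] * pad
-- ===== Notes on version B (the rewrite author's own statement) =====
-- stated objective: alternative
-- what changed: B builds the result as a tiled 2-element alternating pattern sliced to the clamped limit plus a zero pad, instead of allocating a zero list and writing 1s at strided indices in a loop.
import Mathlib
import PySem

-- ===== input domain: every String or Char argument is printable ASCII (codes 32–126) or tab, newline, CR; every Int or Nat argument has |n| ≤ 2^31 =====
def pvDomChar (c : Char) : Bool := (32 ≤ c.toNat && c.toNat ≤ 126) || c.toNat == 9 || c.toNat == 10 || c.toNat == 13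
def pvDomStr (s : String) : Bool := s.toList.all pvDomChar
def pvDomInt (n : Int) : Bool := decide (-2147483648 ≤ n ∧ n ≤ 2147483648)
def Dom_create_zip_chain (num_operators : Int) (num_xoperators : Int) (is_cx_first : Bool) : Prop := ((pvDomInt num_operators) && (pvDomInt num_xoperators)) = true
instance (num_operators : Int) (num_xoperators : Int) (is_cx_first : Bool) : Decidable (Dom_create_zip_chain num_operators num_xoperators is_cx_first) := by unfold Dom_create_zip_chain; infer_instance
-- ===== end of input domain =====

-- B builds the list as a tiled 2-element pattern sliced to length plus a zero pad, instead of
-- zero-filling and writing 1s at strided indices (objective: alternative decomposition, same cost).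

-- ===== PORT A =====
def create_zip_chain (num_operators : Int) (num_xoperators : Int) (is_cx_first : Bool) : List Int :=
  let total := num_operators + num_xoperators
  let result := PySem.List.pyRepeat [(0 : Int)] total
  let start : Int := if is_cx_first then 0 else 1
  (PySem.List.pyRange start (min total (num_xoperators * 2)) 2).foldl
    (fun acc i => PySem.List.pySetD acc i 1) result

-- ===== PORT B =====
def create_zip_chain_alt (num_operators : Int) (num_xoperators : Int) (is_cx_first : Bool) : List Int :=
  let total := num_operators + num_xoperators
  let limit := max 0 (min total (num_xoperators * 2))
  let pad := max 0 (total - limit)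
  let unit : List Int := if is_cx_first then [1, 0] else [0, 1]
  let block := PySem.List.slice (PySem.List.pyRepeat unit (PySem.Int.floordiv (limit + 1) 2)) none (some limit)
  block ++ PySem.List.pyRepeat [(0 : Int)] pad

-- ===== PRECONDITION & SPEC =====
def Spec_create_zip_chain (num_operators : Int) (num_xoperators : Int) (is_cx_first : Bool) (out : List Int) : Prop := out = create_zip_chain_alt num_operators num_xoperators is_cx_first
instance (num_operators : Int) (num_xoperators : Int) (is_cx_first : Bool) (out : List Int) : Decidable (Spec_create_zip_chain num_operators num_xoperators is_cx_first out) := by unfold Spec_create_zip_chain; infer_instance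

-- ===== CLAIM (what is proved, stated in full; the proofs are below) =====
def Claim_equal_create_zip_chain : Prop := ∀ (num_operators : Int) (num_xoperators : Int) (is_cx_first : Bool), Dom_create_zip_chain num_operators num_xoperators is_cx_first → Spec_create_zip_chain num_operators num_xoperators is_cx_first (create_zip_chain num_operators num_xoperators is_cx_first)

-- ===== LEMMAS AND PROOFS =====

-- xs * n is n tiled copies of xs
theorem pv_pyRepeat_eq (u : List Int) (n : Int) :
    PySem.List.pyRepeat u n = (List.replicate n.toNat u).flatten := by
  simp [PySem.List.pyRepeat]

-- the strided-write loop preserves the list length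
theorem pv_len_foldl_set (l : List Int) (xs : List Int) :
    (l.foldl (fun acc i => PySem.List.pySetD acc i (1 : Int)) xs).length = xs.length := by
  induction l generalizing xs with
  | nil => rfl
  | cons i tl ih => simp [List.foldl_cons, ih, PySem.List.length_pySetD]

-- element characterisation of the strided-write loop (all written indices nonnegative)
theorem pv_getElem_foldl_set (l : List Int) (hl : ∀ i ∈ l, 0 ≤ i) (xs : List Int)
    (j : Nat) (hj : j < xs.length) :
    (l.foldl (fun acc i => PySem.List.pySetD acc i (1 : Int)) xs)[j]'(by
      rw [pv_len_foldl_set]; exact hj) = if (j : Int) ∈ l then 1 else xs[j] := by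
  induction l generalizing xs with
  | nil => simp
  | cons i tl ih =>
    have hi : 0 ≤ i := hl i (by simp)
    have htl : ∀ x ∈ tl, 0 ≤ x := fun x hx => hl x (by simp [hx])
    have hset : PySem.List.pySetD xs i (1 : Int) = xs.set i.toNat 1 :=
      PySem.List.pySetD_of_nonneg xs 1 hi
    have hjlen : j < (xs.set i.toNat (1 : Int)).length := by simpa using hj
    have := ih htl (xs.set i.toNat 1) hjlen
    simp only [List.foldl_cons, hset, this]
    by_cases hmem : (j : Int) ∈ tl
    · simp [hmem]
    · by_cases hji : (j : Int) = i
      · have : i.toNat = j := by omega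
        simp [hji, this]
      · have hne : i.toNat ≠ j := by omega
        simp [hmem, hji, hne]

-- a tiled 2-element pattern has length 2n …
theorem pv_len_flatten_pair (a b : Int) (n : Nat) :
    (List.replicate n [a, b]).flatten.length = 2 * n := by
  induction n with
  | zero => rfl
  | succ k ih => simp [List.replicate_succ, ih]; omega

-- … and alternates by index parity
theorem pv_getElem_flatten_pair (a b : Int) (n j : Nat)
    (hj : j < (List.replicate n [a, b]).flatten.length) :
    (List.replicate n [a, b]).flatten[j] = if j % 2 = 0 then a else b := by
  induction n generalizing j with
  | zero => simp at hj
  | succ k ih =>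
    simp only [List.replicate_succ, List.flatten_cons, List.cons_append, List.nil_append] at hj ⊢
    match j, hj with
    | 0, _ => simp
    | 1, _ => simp
    | (m + 2), hj =>
      have hm : m < (List.replicate k [a, b]).flatten.length := by
        simp only [List.length_cons] at hj; omega
      simp only [List.getElem_cons_succ]
      rw [ih m hm]
      have h2 : (m + 2) % 2 = m % 2 := by omega
      rw [h2]

-- the common core: A's strided-write loop equals B's tile-slice-pad construction
theorem pv_core (total m s a b : Int) (hmt : m ≤ total) (hs0 : 0 ≤ s) (hs1 : s ≤ 1)
    (hval : ∀ j : Nat, (if s ≤ (j : Int) ∧ 2 ∣ ((j : Int) - s) then (1 : Int) else 0)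
      = if j % 2 = 0 then a else b) :
    (PySem.List.pyRange s m 2).foldl (fun acc i => PySem.List.pySetD acc i 1)
        (List.replicate total.toNat 0)
      = (List.replicate (PySem.Int.floordiv (max 0 m + 1) 2).toNat [a, b]).flatten.take (max 0 m).toNat
        ++ List.replicate (max 0 (total - max 0 m)).toNat 0 := by
  set limit := max 0 m with hlimit
  set q := PySem.Int.floordiv (limit + 1) 2 with hq
  set pad := max 0 (total - limit) with hpad
  have hlim0 : 0 ≤ limit := le_max_left _ _
  have hq' : q = (limit + 1) / 2 := by rw [hq, PySem.Int.floordiv_eq_ediv_of_pos (by omega)]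
  have hflen : (List.replicate q.toNat [a, b]).flatten.length = 2 * q.toNat :=
    pv_len_flatten_pair a b q.toNat
  have hblen : ((List.replicate q.toNat [a, b]).flatten.take limit.toNat).length = limit.toNat := by
    rw [List.length_take, hflen]; omega
  have hrange : ∀ i ∈ PySem.List.pyRange s m 2, 0 ≤ i := by
    intro i hi
    have := (PySem.List.mem_pyRange_iff_of_pos (show (0:Int) < 2 by omega) i).mp hi
    omega
  apply List.ext_getElem
  · rw [pv_len_foldl_set]; simp [hblen]; omega
  intro j hj1 hj2
  have hjlen : j < total.toNat := by rw [pv_len_foldl_set] at hj1; simpa using hj1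
  rw [pv_getElem_foldl_set _ hrange _ j (by simpa using hjlen)]
  simp only [PySem.List.mem_pyRange_iff_of_pos (show (0:Int) < 2 by omega)]
  rw [List.getElem_append]
  simp only [List.getElem_replicate]
  by_cases hjb : j < limit.toNat
  · rw [dif_pos (by rw [hblen]; exact hjb)]
    have hjf : j < (List.replicate q.toNat [a, b]).flatten.length := by rw [hflen]; omega
    rw [List.getElem_take, pv_getElem_flatten_pair a b q.toNat j hjf]
    have hjm : (j : Int) < m := by omega
    rw [← hval j]
    by_cases hc : s ≤ (j : Int) ∧ 2 ∣ ((j : Int) - s)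
    · rw [if_pos hc, if_pos ⟨hc.1, hjm, hc.2⟩]
    · rw [if_neg hc, if_neg (by tauto)]
  · rw [dif_neg (by rw [hblen]; exact hjb)]
    have hcond : ¬ (s ≤ (j : Int) ∧ (j : Int) < m ∧ 2 ∣ (j : Int) - s) := by
      rintro ⟨_, h2, _⟩; omega
    rw [if_neg hcond]

-- ===== VERDICT (by name: the statement is the Claim_ definition above) =====
theorem create_zip_chain_spec : Claim_equal_create_zip_chain := by
  intro no nx f _
  cases f
  · simp only [Spec_create_zip_chain, create_zip_chain, create_zip_chain_alt,
      Bool.false_eq_true, reduceIte]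
    rw [PySem.List.pyRepeat_singleton, PySem.List.pyRepeat_singleton, pv_pyRepeat_eq,
      PySem.List.slice_to _ (le_max_left _ _)]
    exact pv_core (no + nx) (min (no + nx) (nx * 2)) 1 0 1 (min_le_left _ _)
      (by omega) (by omega) (fun j => by split_ifs <;> omega)
  · simp only [Spec_create_zip_chain, create_zip_chain, create_zip_chain_alt, reduceIte]
    rw [PySem.List.pyRepeat_singleton, PySem.List.pyRepeat_singleton, pv_pyRepeat_eq,
      PySem.List.slice_to _ (le_max_left _ _)]
    exact pv_core (no + nx) (min (no + nx) (nx * 2)) 0 1 0 (min_le_left _ _)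
      (by omega) (by omega) (fun j => by split_ifs <;> omega)
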